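-- pv_equiv track=rewrite | github.com/facdbe-kt/Post-training-Codebase | src/utils/logger.py | cut_last_tbl
-- ===== SOURCE A (Python) =====
-- def cut_last_tbl(msg):
--
--     lines = msg.split('\n')
--     last_beg, last_end = -1, -1
--     for i, line in enumerate(lines):
--         if line.strip() == '/*':
--             last_beg = i
--         if line.strip() == '*/':
--             last_end = i
--
--     if last_beg >= last_end:
--         return msg
--
--     # cut the table, only keep the first 1 lines and last 1 lines
--     new_prompt = '\n'.join(lines[:last_beg+4] + ['......'] + lines[last_end-1:])
--
--     return new_prompt
-- ===== SOURCE B (Python) =====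
-- def _last_marker(lines, marker):
--     i = len(lines) - 1
--     for line in reversed(lines):
--         if line.strip() == marker:
--             return i
--         i -= 1
--     return -1
--
--
-- def cut_last_tbl(msg):
--     lines = msg.split('\n')
--     last_end = _last_marker(lines, '*/')
--     last_beg = _last_marker(lines, '/*')
--     if last_beg >= last_end:
--         return msg
--     return '\n'.join(lines[:last_beg + 4] + ['......'] + lines[last_end - 1:])
-- ===== Notes on version B (the rewrite author's own statement) =====
-- stated objective: alternative
-- what changed: Replaces the single forward pass that keeps updating last_beg and last_end for every line by two early-terminating backward scans over reversed(lines), each returning the last occurrence of its marker directly.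
import Mathlib
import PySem

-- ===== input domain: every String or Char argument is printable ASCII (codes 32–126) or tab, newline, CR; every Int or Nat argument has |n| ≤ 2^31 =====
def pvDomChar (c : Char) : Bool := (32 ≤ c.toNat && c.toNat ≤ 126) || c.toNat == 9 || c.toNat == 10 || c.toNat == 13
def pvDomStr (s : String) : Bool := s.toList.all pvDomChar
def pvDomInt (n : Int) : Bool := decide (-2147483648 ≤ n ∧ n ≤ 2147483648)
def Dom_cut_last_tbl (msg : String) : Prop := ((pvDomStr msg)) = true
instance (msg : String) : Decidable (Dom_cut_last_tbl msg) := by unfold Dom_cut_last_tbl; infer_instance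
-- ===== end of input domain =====

-- B replaces A's single forward pass (updating both markers on every line) by two
-- early-terminating backward scans for the last '/*' and '*/' lines; same cost (alternative).

-- ===== PORT A =====
-- A: one forward pass over enumerate(lines), updating last_beg/last_end for each line.
def cut_last_tbl (msg : String) : String :=
  let lines := (PySem.Str.split? msg "\n").getD []
  let st := (PySem.List.enumerate lines 0).foldl
    (fun (st : Int × Int) (iv : Int × String) =>
      let st := if PySem.Str.strip iv.2 == "/*" then (iv.1, st.2) else st
      if PySem.Str.strip iv.2 == "*/" then (st.1, iv.1) else st)
    (-1, -1)
  if st.1 ≥ st.2 then msg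
  else
    PySem.Str.join "\n"
      (PySem.List.slice lines none (some (st.1 + 4)) ++ ["......"] ++
       PySem.List.slice lines (some (st.2 - 1)) none)

-- ===== PORT B =====
-- B helper: walk reversed(lines) with a descending index, return at the first hit.
def pvLastMarker (rev : List String) (i : Int) (marker : String) : Int :=
  match rev with
  | [] => -1
  | l :: rest => if PySem.Str.strip l == marker then i else pvLastMarker rest (i - 1) marker

def cut_last_tbl_alt (msg : String) : String :=
  let lines := (PySem.Str.split? msg "\n").getD []
  let last_end := pvLastMarker lines.reverse ((lines.length : Int) - 1) "*/"
  let last_beg := pvLastMarker lines.reverse ((lines.length : Int) - 1) "/*"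
  if last_beg ≥ last_end then msg
  else
    PySem.Str.join "\n"
      (PySem.List.slice lines none (some (last_beg + 4)) ++ ["......"] ++
       PySem.List.slice lines (some (last_end - 1)) none)

-- ===== PRECONDITION & SPEC =====
def Spec_cut_last_tbl (msg : String) (out : String) : Prop := out = cut_last_tbl_alt msg
instance (msg : String) (out : String) : Decidable (Spec_cut_last_tbl msg out) := by unfold Spec_cut_last_tbl; infer_instance

-- ===== CLAIM (what is proved, stated in full; the proofs are below) =====
def Claim_equal_cut_last_tbl : Prop := ∀ (msg : String), Dom_cut_last_tbl msg → Spec_cut_last_tbl msg (cut_last_tbl msg)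

-- ===== LEMMAS AND PROOFS =====

-- A's pair-state fold splits into two independent last-index folds.
theorem pv_fold_split (xs : List (Int × String)) (a b : Int) :
    xs.foldl
      (fun (st : Int × Int) (iv : Int × String) =>
        let st := if PySem.Str.strip iv.2 == "/*" then (iv.1, st.2) else st
        if PySem.Str.strip iv.2 == "*/" then (st.1, iv.1) else st)
      (a, b)
    = (xs.foldl (fun x iv => if PySem.Str.strip iv.2 == "/*" then iv.1 else x) a,
       xs.foldl (fun x iv => if PySem.Str.strip iv.2 == "*/" then iv.1 else x) b) := by
  induction xs generalizing a b with
  | nil => rfl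
  | cons hd tl ih =>
    simp only [List.foldl_cons]
    split_ifs <;> simp_all

-- a last-index fold over enumerate = B's backward scan on the reversed list.
theorem pv_fold_eq_back (marker : String) (lines : List String) (s : Int) :
    (PySem.List.enumerate lines s).foldl
        (fun x iv => if PySem.Str.strip iv.2 == marker then iv.1 else x) (-1)
    = pvLastMarker lines.reverse (s + (lines.length : Int) - 1) marker := by
  induction lines using List.reverseRecOn generalizing s with
  | nil => rfl
  | append_singleton ys y ih =>
    rw [PySem.List.enumerate_append, List.foldl_append]
    simp only [PySem.List.enumerate_cons, PySem.List.enumerate_nil, List.foldl_cons,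
      List.foldl_nil, List.reverse_append, List.reverse_cons, List.reverse_nil,
      List.nil_append, List.cons_append, List.length_append, List.length_cons,
      List.length_nil]
    rw [pvLastMarker]
    by_cases h : PySem.Str.strip y == marker
    · simp [h]
      omega
    · simp only [h, if_neg, Bool.false_eq_true, not_false_eq_true]
      rw [ih s]
      congr 1
      push_cast
      ring

-- ===== VERDICT (by name: the statement is the Claim_ definition above) =====
theorem cut_last_tbl_spec : Claim_equal_cut_last_tbl := by
  intro msg _
  unfold Spec_cut_last_tbl cut_last_tbl cut_last_tbl_alt
  simp only [pv_fold_split]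
  rw [pv_fold_eq_back, pv_fold_eq_back]
  simp
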